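-- pv_equiv track=rewrite | github.com/AnderssonProgramming/AYED-resources | THIRD TERM/ARENA/ultimaArena/printerQueue.py | calculate_print_time
-- ===== SOURCE A (Python) =====
-- from collections import deque
--
-- def calculate_print_time(n, m, priorities):
--     # Crea una cola con tuplas (prioridad, es_mi_trabajo)
--     queue = deque((priority, i == m) for i, priority in enumerate(priorities))
--
--     # Ordena las prioridades en orden descendente
--     sorted_priorities = sorted(priorities, reverse=True)
--
--     time_until_printed = 0
--     while True:
--         # Toma el primer trabajo en la cola
--         job = queue.popleft()
--
--         # Si hay un trabajo en la cola con mayor prioridad, mueve el trabajo actual al final de la cola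
--         if job[0] < sorted_priorities[0]:
--             queue.append(job)
--         else:
--             # Imprime el trabajo y aumenta el tiempo
--             time_until_printed += 1
--             sorted_priorities.pop(0)
--
--             # Si el trabajo impreso es tu trabajo, termina el bucle
--             if job[1]:
--                 break
--
--     return time_until_printed
-- ===== SOURCE B (Python) =====
-- from bisect import bisect_left
--
-- def calculate_print_time(n, m, priorities):
--     # Group job indices by priority (each group's indices are ascending),
--     # then walk the distinct priorities in descending order keeping a cyclic
--     # scan pointer: a group prints in cyclic index order starting at the
--     # pointer, and the pointer moves past the group's last printed job.
--     groups = {}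
--     for i, p in enumerate(priorities):
--         groups.setdefault(p, []).append(i)
--
--     target = priorities[m]
--     time = 0
--     pointer = 0
--     for q in sorted(groups, reverse=True):
--         g = groups[q]
--         k = bisect_left(g, pointer)
--         if q == target:
--             cyclic = g[k:] + g[:k]
--             return time + cyclic.index(m) + 1
--         time += len(g)
--         last = g[k - 1] if k > 0 else g[-1]
--         pointer = last + 1
-- ===== Notes on version B (the rewrite author's own statement) =====
-- stated objective: faster
-- what changed: Instead of simulating the deque job-by-job against a pre-sorted priority list, B groups job indices by priority once, walks the distinct priorities in descending order, and finds each group's printing window with bisect on a cyclic scan pointer, so no queue rotation is ever performed.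
import Mathlib
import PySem

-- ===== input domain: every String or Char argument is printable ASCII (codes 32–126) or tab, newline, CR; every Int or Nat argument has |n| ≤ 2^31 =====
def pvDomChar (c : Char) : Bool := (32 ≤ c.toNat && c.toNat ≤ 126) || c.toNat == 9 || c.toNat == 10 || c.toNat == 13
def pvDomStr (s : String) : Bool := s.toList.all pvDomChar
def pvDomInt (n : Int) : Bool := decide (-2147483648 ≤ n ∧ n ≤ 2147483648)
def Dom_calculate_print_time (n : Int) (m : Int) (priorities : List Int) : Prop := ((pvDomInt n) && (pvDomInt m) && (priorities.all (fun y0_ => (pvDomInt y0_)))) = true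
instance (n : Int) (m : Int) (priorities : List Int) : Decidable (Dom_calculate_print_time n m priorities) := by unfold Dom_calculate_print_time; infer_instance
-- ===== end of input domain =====

-- B replaces A's queue simulation by one O(n log n) pass over the distinct priorities
-- in descending order, locating each group's printing window with a cyclic scan pointer.

-- ===== PORT A =====
-- the while-loop of A; the fuel argument only makes the recursion structural (it is
-- proved sufficient), each unit of fuel is one iteration of Python's `while True`
def pvLoopA (fuel : Nat) (queue : List (Int × Bool)) (sp : List Int) (t : Int) : Int :=
  match fuel with
  | 0 => 0
  | fuel + 1 =>
    match queue with
    | [] => 0                -- queue.popleft() on an empty deque: IndexError (outside Pre_)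
    | job :: rest =>
      match sp with
      | [] => 0              -- sorted_priorities[0] on []: IndexError (outside Pre_)
      | s0 :: sptl =>
        if job.1 < s0 then pvLoopA fuel (rest ++ [job]) (s0 :: sptl) t
        else if job.2 then t + 1
        else pvLoopA fuel rest sptl (t + 1)

def calculate_print_time (n : Int) (m : Int) (priorities : List Int) : Int :=
  pvLoopA (priorities.length * priorities.length + 1)
    ((PySem.List.enumerate priorities 0).map (fun ip => (ip.2, decide (ip.1 = m))))
    (PySem.List.sorted priorities (fun x => x) true) 0

-- ===== PORT B =====
-- groups.setdefault(p, []).append(i)  — group indices by priority, insertion order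
def pvBuildGroups (l : List (Int × Int)) : PySem.Dict Int (List Int) :=
  l.foldl (fun d x => d.modify x.2 [] (fun v => v ++ [x.1])) PySem.Dict.empty

-- the 'for q in sorted(groups, reverse=True)' loop of B
def pvLoopB (d : PySem.Dict Int (List Int)) (target : Int) (m : Int) :
    List Int → Int → Int → Int
  | [], _, _ => 0            -- loop falls through (unreachable under Pre_: target is a key)
  | q :: qs, time, pointer =>
    let g := d.getD q []
    let k := PySem.List.bisectLeft g pointer
    if q = target then
      let cyclic := PySem.List.slice g (some (k : Int)) none ++
                    PySem.List.slice g none (some (k : Int))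
      time + (((PySem.List.index? cyclic m).getD 0 : Nat) : Int) + 1
    else
      let last := if 0 < k then PySem.List.pyGetD g ((k : Int) - 1) 0
                  else PySem.List.pyGetD g (-1) 0
      pvLoopB d target m qs (time + (g.length : Int)) (last + 1)

def calculate_print_time_alt (n : Int) (m : Int) (priorities : List Int) : Int :=
  let groups := pvBuildGroups (PySem.List.enumerate priorities 0)
  let target := PySem.List.pyGetD priorities m 0
  pvLoopB groups target m (PySem.List.sorted groups.keys (fun x => x) true) 0 0

-- ===== PRECONDITION & SPEC =====
-- Pre_ excludes exactly the inputs where A raises IndexError (job m does not exist, so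
-- the queue is eventually popped empty); B also raises there.
def Pre_calculate_print_time (n : Int) (m : Int) (priorities : List Int) : Prop :=
  0 ≤ m ∧ m < priorities.length
instance (n : Int) (m : Int) (priorities : List Int) : Decidable (Pre_calculate_print_time n m priorities) := by unfold Pre_calculate_print_time; infer_instance

def pvWitness_calculate_print_time : Int × Int × List Int := (4, 2, [1, 3, 2, 3])

def Spec_calculate_print_time (n : Int) (m : Int) (priorities : List Int) (out : Int) : Prop := out = calculate_print_time_alt n m priorities
instance (n : Int) (m : Int) (priorities : List Int) (out : Int) : Decidable (Spec_calculate_print_time n m priorities out) := by unfold Spec_calculate_print_time; infer_instance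

-- ===== CLAIM (what is proved, stated in full; the proofs are below) =====
def Claim_equal_calculate_print_time : Prop := ∀ (n : Int) (m : Int) (priorities : List Int), Dom_calculate_print_time n m priorities → Pre_calculate_print_time n m priorities → Spec_calculate_print_time n m priorities (calculate_print_time n m priorities)

-- ===== LEMMAS AND PROOFS =====

-- the entry A's queue stores for job x = (index, priority)
def pvQ (m : Int) (x : Int × Int) : Int × Bool := (x.2, decide (x.1 = m))

-- the remaining jobs, as A's queue sees them: rotated so that indices ≥ ptr come first
def pvRot (R : List (Int × Int)) (ptr : Int) : List (Int × Int) :=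
  R.filter (fun x => decide (ptr ≤ x.1)) ++ R.filter (fun x => decide (x.1 < ptr))

-- jobs are listed in strictly increasing index order
def pvAsc (R : List (Int × Int)) : Prop := R.Pairwise (fun a b => a.1 < b.1)

lemma pvRot_perm (R : List (Int × Int)) (ptr : Int) : (pvRot R ptr).Perm R := by
  unfold pvRot
  have h : R.filter (fun x => decide (x.1 < ptr)) = R.filter (fun x => !decide (ptr ≤ x.1)) := by
    apply List.filter_congr; intro x _
    rw [← decide_not]
    exact decide_eq_decide.mpr (by omega)
  rw [h]; exact List.filter_append_perm _ R

lemma pvRot_length (R : List (Int × Int)) (ptr : Int) : (pvRot R ptr).length = R.length :=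
  (pvRot_perm R ptr).length_eq

-- A's inner rotation: all of pre is outrun, then the head job prints
lemma pvRotA (s0 t : Int) (sptl : List Int) :
    ∀ (pre : List (Int × Bool)) (j : Int × Bool) (post : List (Int × Bool)) (fuel : Nat),
    (∀ x ∈ pre, x.1 < s0) → ¬ (j.1 < s0) →
    pvLoopA (pre.length + (fuel + 1)) (pre ++ j :: post) (s0 :: sptl) t =
      if j.2 then t + 1 else pvLoopA fuel (post ++ pre) sptl (t + 1) := by
  intro pre
  induction pre with
  | nil =>
    intro j post fuel _ hj
    simp only [List.length_nil, Nat.zero_add, List.nil_append]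
    rw [pvLoopA.eq_def]
    simp only [if_neg hj, List.append_nil]
  | cons x pre ih =>
    intro j post fuel hpre hj
    have hx : x.1 < s0 := hpre x (List.mem_cons_self ..)
    have : (x :: pre).length + (fuel + 1) = (pre.length + (fuel + 1)) + 1 := by
      simp [List.length_cons]; omega
    rw [this, List.cons_append, pvLoopA.eq_def]
    simp only [if_pos hx]
    have harr : (pre ++ j :: post) ++ [x] = pre ++ j :: (post ++ [x]) := by simp
    rw [harr, ih j (post ++ [x]) fuel (fun y hy => hpre y (List.mem_cons_of_mem _ hy)) hj]
    congr 1
    simp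

-- a chain (by a key) splits at any cut point into the low part followed by the high part
lemma pvChainSplit {α : Type} (key : α → Int) (c : Int) :
    ∀ (l : List α), l.Pairwise (fun a b => key a < key b) →
    l = l.filter (fun x => decide (key x < c)) ++ l.filter (fun x => decide (c ≤ key x)) := by
  intro l h
  induction l with
  | nil => simp
  | cons a l ih =>
    rcases List.pairwise_cons.mp h with ⟨ha, hl⟩
    by_cases hc : key a < c
    · simp only [List.filter_cons, decide_eq_true_eq, hc, if_true,
        if_neg (by omega : ¬ c ≤ key a)]
      rw [List.cons_append]
      congr 1
      exact ih hl
    · have h1 : l.filter (fun x => decide (key x < c)) = [] := by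
        apply List.filter_eq_nil_iff.mpr; intro x hx; simp; have := ha x hx; omega
      have h2 : l.filter (fun x => decide (c ≤ key x)) = l := by
        apply List.filter_eq_self.mpr; intro x hx; simp; have := ha x hx; omega
      simp [hc, not_lt.mp hc, h1, h2]

lemma pvFilterGeCons {α : Type} (key : α → Int) :
    ∀ (l : List α) (j : α), l.Pairwise (fun a b => key a < key b) → j ∈ l →
    l.filter (fun x => decide (key j ≤ key x)) = j :: l.filter (fun x => decide (key j < key x)) := by
  intro l
  induction l with
  | nil => intro j _ hj; simp at hj
  | cons a l ih =>
    intro j h hj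
    rcases List.pairwise_cons.mp h with ⟨ha, hl⟩
    rcases List.mem_cons.mp hj with rfl | hj
    · have h1 : l.filter (fun x => decide (key j ≤ key x)) = l.filter (fun x => decide (key j < key x)) := by
        apply List.filter_congr; intro x hx; simp; have := ha x hx; omega
      simp [h1]
    · have haj : key a < key j := ha j hj
      have h1 : (decide (key j ≤ key a)) = false := by simp; omega
      have h2 : (decide (key j < key a)) = false := by simp; omega
      simp only [List.filter_cons, h1, h2]
      exact ih j hl hj

-- a chain splits at any of its members
lemma pvChainSplitAt {α : Type} (key : α → Int) (l : List α) (j : α)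
    (h : l.Pairwise (fun a b => key a < key b)) (hj : j ∈ l) :
    l = l.filter (fun x => decide (key x < key j)) ++ j :: l.filter (fun x => decide (key j < key x)) := by
  have := pvChainSplit key (key j) l h
  rw [pvFilterGeCons key l j h hj] at this
  exact this

-- a Nodup list splits at an element in exactly one way
lemma pvNodupSplit {α : Type} :
    ∀ (u u' : List α) (j : α) (v v' : List α), (u ++ j :: v).Nodup →
    u ++ j :: v = u' ++ j :: v' → u = u' ∧ v = v' := by
  intro u
  induction u with
  | nil =>
    intro u' j v v' hnd heq
    cases u' with
    | nil => simp at heq; simp [heq]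
    | cons a u' =>
      exfalso
      simp only [List.nil_append, List.cons_append, List.cons_eq_cons] at heq
      obtain ⟨rfl, heq⟩ := heq
      rcases List.nodup_cons.mp hnd with ⟨hj, -⟩
      exact hj (by rw [heq]; exact List.mem_append_right _ (List.mem_cons_self ..))
  | cons a u ih =>
    intro u' j v v' hnd heq
    cases u' with
    | nil =>
      exfalso
      simp only [List.nil_append, List.cons_append, List.cons_eq_cons] at heq
      obtain ⟨rfl, heq⟩ := heq
      rcases List.nodup_cons.mp hnd with ⟨hj, -⟩
      exact hj (List.mem_append_right _ (List.mem_cons_self ..))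
    | cons b u' =>
      rw [List.cons_append, List.cons_append, List.cons_eq_cons] at heq
      obtain ⟨rfl, heq⟩ := heq
      have := ih u' j v v' (by simpa using hnd.of_cons) heq
      exact ⟨by rw [this.1], this.2⟩

-- removing the job that just printed and advancing the pointer past it
-- is exactly "move the scanned prefix to the back of the queue"
lemma pvDecAnd {p q r : Prop} [Decidable p] [Decidable q] [Decidable r]
    (h : p ∧ q ↔ r) : (decide p && decide q) = decide r := by
  have h' : r ↔ p ∧ q := h.symm
  by_cases hp : p <;> by_cases hq : q <;> simp [hp, hq, h']

lemma pvFilterCongrR (R : List (Int × Int)) (p q : Int × Int → Bool)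
    (h : ∀ x, p x = q x) : R.filter p = R.filter q :=
  List.filter_congr (fun x _ => h x)

lemma pvRotSplit (R : List (Int × Int)) (ptr : Int) (u v : List (Int × Int)) (j : Int × Int)
    (hR : pvAsc R) (hsplit : pvRot R ptr = u ++ j :: v) :
    pvRot (R.erase j) (j.1 + 1) = v ++ u := by
  have hperm := pvRot_perm R ptr
  have hndR : R.Nodup := hR.imp (fun hlt heq => by subst heq; exact absurd hlt (lt_irrefl _))
  have hnd : (pvRot R ptr).Nodup := hperm.nodup_iff.mpr hndR
  have hjrot : j ∈ pvRot R ptr := by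
    rw [hsplit]; exact List.mem_append_right _ (List.mem_cons_self ..)
  have hjR : j ∈ R := hperm.mem_iff.mp hjrot
  -- the canonical split of R at j
  have hB := pvChainSplitAt Prod.fst R j hR hjR
  set B1 := R.filter (fun x => decide (x.1 < j.1)) with hB1
  set B2 := R.filter (fun x => decide (j.1 < x.1)) with hB2
  have hB1asc : pvAsc B1 := hR.sublist List.filter_sublist
  have hB2asc : pvAsc B2 := hR.sublist List.filter_sublist
  have hjB1 : j ∉ B1 := by
    intro hmem
    have := (List.mem_filter.mp hmem).2
    simp at this
  have herase : R.erase j = B1 ++ B2 := by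
    conv_lhs => rw [hB]
    rw [List.erase_append_right _ hjB1, List.erase_cons_head]
  have hmemB1 : ∀ x ∈ B1, x.1 < j.1 := fun x hx => by
    have := (List.mem_filter.mp (hB1 ▸ hx)).2; simpa using this
  have hmemB2 : ∀ x ∈ B2, j.1 < x.1 := fun x hx => by
    have := (List.mem_filter.mp (hB2 ▸ hx)).2; simpa using this
  -- the left-hand side is B2 ++ B1
  have hlhs : pvRot (R.erase j) (j.1 + 1) = B2 ++ B1 := by
    unfold pvRot
    rw [herase, List.filter_append, List.filter_append]
    rw [List.filter_eq_nil_iff.mpr (fun x hx => by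
          simp only [decide_eq_true_eq]; have := hmemB1 x hx; omega),
        List.filter_eq_self.mpr (fun x hx => by
          simp only [decide_eq_true_eq]; have := hmemB2 x hx; omega),
        List.filter_eq_self.mpr (fun x hx => by
          simp only [decide_eq_true_eq]; have := hmemB1 x hx; omega),
        List.filter_eq_nil_iff.mpr (fun x hx => by
          simp only [decide_eq_true_eq]; have := hmemB2 x hx; omega)]
    simp
  rw [hlhs]
  set A1 := R.filter (fun x => decide (ptr ≤ x.1)) with hA1
  set A2 := R.filter (fun x => decide (x.1 < ptr)) with hA2
  have hA1asc : pvAsc A1 := hR.sublist List.filter_sublist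
  have hA2asc : pvAsc A2 := hR.sublist List.filter_sublist
  by_cases hptr : ptr ≤ j.1
  · -- j is in the first block A1
    have hjA1 : j ∈ A1 := List.mem_filter.mpr ⟨hjR, by simp; omega⟩
    have hsplitA1 := pvChainSplitAt Prod.fst A1 j hA1asc hjA1
    have hw : A1.filter (fun x => decide (j.1 < x.1)) = B2 := by
      rw [hA1, List.filter_filter, hB2]
      exact pvFilterCongrR R _ _ (fun x => by
        exact pvDecAnd (by omega))
    have hu0 : A1.filter (fun x => decide (x.1 < j.1)) =
        R.filter (fun x => decide (ptr ≤ x.1 ∧ x.1 < j.1)) := by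
      rw [hA1, List.filter_filter]
      exact pvFilterCongrR R _ _ (fun x => by
        exact pvDecAnd (by omega))
    rw [hw, hu0] at hsplitA1
    have hrot : pvRot R ptr = R.filter (fun x => decide (ptr ≤ x.1 ∧ x.1 < j.1)) ++ j :: (B2 ++ A2) := by
      unfold pvRot
      rw [← hA1, ← hA2, hsplitA1]
      simp [List.append_assoc]
    have hndsplit : (u ++ j :: v).Nodup := hsplit ▸ hnd
    obtain ⟨rfl, rfl⟩ := pvNodupSplit u _ j v _ hndsplit (hsplit.symm.trans hrot)
    -- B1 = A2 ++ u0
    have hsplitB1 := pvChainSplit Prod.fst ptr B1 hB1asc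
    have e1 : B1.filter (fun x => decide (x.1 < ptr)) = A2 := by
      rw [hB1, List.filter_filter, hA2]
      exact pvFilterCongrR R _ _ (fun x => by
        exact pvDecAnd (by omega))
    have e2 : B1.filter (fun x => decide (ptr ≤ x.1)) =
        R.filter (fun x => decide (ptr ≤ x.1 ∧ x.1 < j.1)) := by
      rw [hB1, List.filter_filter]
      exact pvFilterCongrR R _ _ (fun x => by
        exact pvDecAnd (by omega))
    rw [e1, e2] at hsplitB1
    rw [hsplitB1]
    simp [List.append_assoc]
  · -- j is in the second block A2
    have hjA2 : j ∈ A2 := List.mem_filter.mpr ⟨hjR, by simp; omega⟩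
    have hsplitA2 := pvChainSplitAt Prod.fst A2 j hA2asc hjA2
    have hw : A2.filter (fun x => decide (x.1 < j.1)) = B1 := by
      rw [hA2, List.filter_filter, hB1]
      exact pvFilterCongrR R _ _ (fun x => by
        exact pvDecAnd (by omega))
    have hv0 : A2.filter (fun x => decide (j.1 < x.1)) =
        R.filter (fun x => decide (j.1 < x.1 ∧ x.1 < ptr)) := by
      rw [hA2, List.filter_filter]
      exact pvFilterCongrR R _ _ (fun x => by
        exact pvDecAnd (by omega))
    rw [hw, hv0] at hsplitA2
    have hrot : pvRot R ptr = (A1 ++ B1) ++ j :: R.filter (fun x => decide (j.1 < x.1 ∧ x.1 < ptr)) := by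
      unfold pvRot
      rw [← hA1, ← hA2, hsplitA2]
      simp [List.append_assoc]
    have hndsplit : (u ++ j :: v).Nodup := hsplit ▸ hnd
    obtain ⟨rfl, rfl⟩ := pvNodupSplit u _ j v _ hndsplit (hsplit.symm.trans hrot)
    -- B2 = v0 ++ A1
    have hsplitB2 := pvChainSplit Prod.fst ptr B2 hB2asc
    have e1 : B2.filter (fun x => decide (x.1 < ptr)) =
        R.filter (fun x => decide (j.1 < x.1 ∧ x.1 < ptr)) := by
      rw [hB2, List.filter_filter]
      exact pvFilterCongrR R _ _ (fun x => by
        exact pvDecAnd (by omega))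
    have e2 : B2.filter (fun x => decide (ptr ≤ x.1)) = A1 := by
      rw [hB2, List.filter_filter, hA1]
      exact pvFilterCongrR R _ _ (fun x => by
        exact pvDecAnd (by omega))
    rw [e1, e2] at hsplitB2
    rw [hsplitB2]
    simp [List.append_assoc]

lemma pvEraseFilter {α : Type} [BEq α] [LawfulBEq α] (p : α → Bool) :
    ∀ (l : List α) (j : α), p j = false → (l.erase j).filter p = l.filter p := by
  intro l j hp
  induction l with
  | nil => simp
  | cons a l ih =>
    by_cases haj : a = j
    · subst haj; rw [List.erase_cons_head]; simp [hp]
    · rw [List.erase_cons_tail (by simp [haj])]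
      simp only [List.filter_cons]
      cases hpa : p a <;> simp [ih]

-- indices are unique, so a job is determined by its index
lemma pvFstInj (R : List (Int × Int)) (hR : pvAsc R) :
    ∀ x ∈ R, ∀ y ∈ R, x.1 = y.1 → x = y := by
  have hp : R.Pairwise (fun a b : Int × Int => a.1 = b.1 → a = b) :=
    hR.imp (fun hlt heq => absurd heq (by omega))
  have h := List.Pairwise.forall_of_forall
    (fun a b hab h1 => (hab h1.symm).symm)
    (fun x _ _ => rfl)
    hp
  exact fun x hx y hy => h hx hy

-- one print step of A
lemma pvStep (m q ptr t : Int) (R : List (Int × Int)) (j : Int × Int)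
    (ctail : List (Int × Int)) (sp : List Int) (fuel : Nat)
    (hR : pvAsc R) (hle : ∀ x ∈ R, x.2 ≤ q)
    (hc : (pvRot R ptr).filter (fun x => decide (x.2 = q)) = j :: ctail)
    (hperm : sp.Perm (R.map (·.2))) (hpw : sp.Pairwise (fun a b => b ≤ a))
    (hfuel : R.length * R.length + 1 ≤ fuel) :
    ∃ fuel', (R.erase j).length * (R.erase j).length + 1 ≤ fuel' ∧
      pvLoopA fuel ((pvRot R ptr).map (pvQ m)) sp t =
        (if j.1 = m then t + 1
         else pvLoopA fuel' ((pvRot (R.erase j) (j.1 + 1)).map (pvQ m)) sp.tail (t + 1)) ∧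
      j ∈ R ∧ j.2 = q ∧
      (pvRot (R.erase j) (j.1 + 1)).filter (fun x => decide (x.2 = q)) = ctail ∧
      sp.tail.Perm ((R.erase j).map (·.2)) ∧ sp.tail.Pairwise (fun a b => b ≤ a) := by
  have hjrotfilter : j ∈ (pvRot R ptr).filter (fun x => decide (x.2 = q)) := by
    rw [hc]; exact List.mem_cons_self ..
  have hjrot : j ∈ pvRot R ptr := (List.mem_filter.mp hjrotfilter).1
  have hjq : j.2 = q := by
    have := (List.mem_filter.mp hjrotfilter).2; simpa using this
  have hjR : j ∈ R := (pvRot_perm R ptr).mem_iff.mp hjrot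
  -- the head of sp is q
  have hqmem : q ∈ R.map (·.2) := List.mem_map.mpr ⟨j, hjR, hjq⟩
  have hqsp : q ∈ sp := hperm.mem_iff.mpr hqmem
  obtain ⟨s0, sp', rfl⟩ : ∃ s0 sp', sp = s0 :: sp' := by
    cases sp with
    | nil => simp at hqsp
    | cons a l => exact ⟨a, l, rfl⟩
  obtain ⟨hall, hpw'⟩ := List.pairwise_cons.mp hpw
  have hs0q : s0 = q := by
    have hs0mem : s0 ∈ R.map (·.2) := hperm.mem_iff.mp (List.mem_cons_self ..)
    obtain ⟨y, hy, hy2⟩ := List.mem_map.mp hs0mem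
    have h1 : s0 ≤ q := hy2 ▸ hle y hy
    rcases List.mem_cons.mp hqsp with h | h
    · omega
    · have := hall q h; omega
  rw [hs0q] at hall hperm ⊢
  -- split the queue at the first job of priority q
  have hsplit : (pvRot R ptr).takeWhile (fun x => !decide (x.2 = q)) ++
      (pvRot R ptr).dropWhile (fun x => !decide (x.2 = q)) = pvRot R ptr :=
    List.takeWhile_append_dropWhile
  set pre := (pvRot R ptr).takeWhile (fun x => !decide (x.2 = q)) with hpredef
  set suf := (pvRot R ptr).dropWhile (fun x => !decide (x.2 = q)) with hsufdef
  have hprefilter : pre.filter (fun x => decide (x.2 = q)) = [] := by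
    apply List.filter_eq_nil_iff.mpr
    intro x hx
    have := List.mem_takeWhile_imp (hpredef ▸ hx)
    simp at this; simp [this]
  have hsufne : suf ≠ [] := by
    intro h0
    have h1 : (pvRot R ptr).filter (fun x => decide (x.2 = q)) = [] := by
      rw [← hsplit, h0, List.append_nil, hprefilter]
    rw [hc] at h1; simp at h1
  obtain ⟨j', post, hsufeq⟩ : ∃ j' post, suf = j' :: post := by
    cases h : suf with
    | nil => exact absurd h hsufne
    | cons a l => exact ⟨a, l, rfl⟩
  have hj'q : decide (j'.2 = q) = true := by
    have h0 : (pvRot R ptr).dropWhile (fun x : Int × Int => !decide (x.2 = q)) = j' :: post := by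
      rw [← hsufdef]; exact hsufeq
    have := List.head_dropWhile_not (fun x : Int × Int => !decide (x.2 = q))
      (l := pvRot R ptr) (by simp [h0])
    simp [h0] at this
    simp [this]
  have hfil : (pvRot R ptr).filter (fun x => decide (x.2 = q)) =
      j' :: post.filter (fun x => decide (x.2 = q)) := by
    conv_lhs => rw [← hsplit]
    rw [List.filter_append, hprefilter, List.nil_append, hsufeq]
    simp [hj'q]
  rw [hc] at hfil
  obtain ⟨hj'j, hctail⟩ := List.cons_eq_cons.mp hfil
  subst hj'j
  have hqueue : pvRot R ptr = pre ++ j :: post := by rw [← hsplit, hsufeq]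
  -- the rotation after this print
  have hrotsplit := pvRotSplit R ptr pre post j hR hqueue
  -- fuel bookkeeping
  have hlen : pre.length + 1 + post.length = R.length := by
    have := congrArg List.length hqueue
    rw [pvRot_length] at this
    simp at this
    omega
  have hRpos : 1 ≤ R.length := by omega
  have hsq : R.length ≤ R.length * R.length := Nat.le_mul_of_pos_left _ hRpos
  obtain ⟨F, hF⟩ : ∃ F, fuel = pre.length + (F + 1) ∧ F = fuel - pre.length - 1 :=
    ⟨fuel - pre.length - 1, by omega, rfl⟩
  -- run A over the rotation and the print
  have hmap : (pvRot R ptr).map (pvQ m) =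
      pre.map (pvQ m) ++ (pvQ m j) :: post.map (pvQ m) := by
    rw [hqueue]; simp
  have hrotA := pvRotA q t sp' (pre.map (pvQ m)) (pvQ m j) (post.map (pvQ m)) F
      (by
        intro x hx
        obtain ⟨y, hy, rfl⟩ := List.mem_map.mp hx
        have hyq : ¬ (y.2 = q) := by
          have := List.mem_takeWhile_imp (hpredef ▸ hy)
          simpa using this
        have hyR : y ∈ R := (pvRot_perm R ptr).mem_iff.mp
          (hqueue ▸ List.mem_append_left _ hy)
        have := hle y hyR
        show y.2 < q
        omega)
      (by show ¬ (j.2 < q); omega)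
  rw [List.length_map] at hrotA
  refine ⟨F, ?_, ?_, hjR, hjq, ?_, ?_, hpw'⟩
  · -- fuel bound
    rw [List.length_erase_of_mem hjR]
    obtain ⟨K, hK⟩ : ∃ K, R.length = K + 1 := ⟨R.length - 1, by omega⟩
    have hexp : (K + 1) * (K + 1) = K * K + 2 * K + 1 := by ring
    rw [hK] at hfuel hlen ⊢
    simp only [Nat.add_sub_cancel]
    omega
  · -- the loop equation
    rw [hmap, hF.1, hrotA, hrotsplit]
    have h2 : (pvQ m j).2 = decide (j.1 = m) := rfl
    rw [h2]
    by_cases hjm : j.1 = m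
    · simp [hjm]
    · simp only [hjm, decide_false, Bool.false_eq_true, if_false]
      rw [List.map_append, List.tail_cons]
  · -- the q-filter of the new rotation is ctail
    rw [hrotsplit, List.filter_append, hprefilter, List.append_nil, hctail]
  · -- sp' still lists the remaining priorities
    have h1 : (R.map (·.2)).Perm (j.2 :: (R.erase j).map (·.2)) :=
      (List.perm_cons_erase hjR).map (·.2)
    rw [hjq] at h1
    exact (hperm.trans h1).cons_inv

-- processing a whole priority group that does not contain job m
lemma pvGroupMiss (m q : Int) :
    ∀ (c : List (Int × Int)) (R : List (Int × Int)) (ptr : Int) (sp : List Int) (t : Int) (fuel : Nat)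
      (hcne : c ≠ []),
    pvAsc R → (∀ x ∈ R, x.2 ≤ q) →
    (pvRot R ptr).filter (fun x => decide (x.2 = q)) = c →
    (∀ x ∈ R, x.1 = m → x.2 ≠ q) →
    sp.Perm (R.map (·.2)) → sp.Pairwise (fun a b => b ≤ a) →
    R.length * R.length + 1 ≤ fuel →
    ∃ (fuel' : Nat) (sp' : List Int),
      (R.filter (fun x => decide (x.2 ≠ q))).length * (R.filter (fun x => decide (x.2 ≠ q))).length + 1 ≤ fuel' ∧
      sp'.Perm ((R.filter (fun x => decide (x.2 ≠ q))).map (·.2)) ∧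
      sp'.Pairwise (fun a b => b ≤ a) ∧
      pvLoopA fuel ((pvRot R ptr).map (pvQ m)) sp t =
        pvLoopA fuel' ((pvRot (R.filter (fun x => decide (x.2 ≠ q))) ((c.getLast hcne).1 + 1)).map (pvQ m)) sp' (t + c.length) := by
  intro c
  induction c with
  | nil => intro R ptr sp t fuel hcne; exact absurd rfl hcne
  | cons j ctail ih =>
    intro R ptr sp t fuel _ hR hle hc hmq hperm hpw hfuel
    obtain ⟨F, hFb, heq, hjR, hjq, hc', hperm', hpw'⟩ :=
      pvStep m q ptr t R j ctail sp fuel hR hle hc hperm hpw hfuel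
    have hjm : ¬ (j.1 = m) := fun h => (hmq j hjR h) hjq
    rw [heq, if_neg hjm]
    have hpj : (fun x : Int × Int => decide (x.2 ≠ q)) j = false := by simp [hjq]
    have hEF : (R.erase j).filter (fun x => decide (x.2 ≠ q)) =
        R.filter (fun x => decide (x.2 ≠ q)) := pvEraseFilter _ R j hpj
    cases ctail with
    | nil =>
      -- j was the last job of this priority group
      have hnoq : ∀ x ∈ R.erase j, ¬ x.2 = q := by
        intro x hx hxq
        have hxrot : x ∈ pvRot (R.erase j) (j.1 + 1) :=
          (pvRot_perm _ _).mem_iff.mpr hx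
        have : x ∈ (pvRot (R.erase j) (j.1 + 1)).filter (fun x => decide (x.2 = q)) :=
          List.mem_filter.mpr ⟨hxrot, by simp [hxq]⟩
        rw [hc'] at this
        simp at this
      have hEE : R.erase j = R.filter (fun x => decide (x.2 ≠ q)) := by
        rw [← hEF]
        exact (List.filter_eq_self.mpr (fun x hx => by simp; exact hnoq x hx)).symm
      refine ⟨F, sp.tail, ?_, ?_, hpw', ?_⟩
      · rw [← hEE]; exact hFb
      · rw [← hEE]; exact hperm'
      · rw [← hEE]
        have hlast : ([j].getLast (by simp)) = j := rfl
        have : (([j] : List (Int × Int)).length : Int) = 1 := by simp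
        rw [hlast, this]
    | cons c2 ct2 =>
      obtain ⟨F2, sp2, hb2, hp2, hw2, heq2⟩ :=
        ih (R.erase j) (j.1 + 1) sp.tail (t + 1) F (by simp)
          (hR.sublist List.erase_sublist)
          (fun x hx => hle x (List.mem_of_mem_erase hx))
          hc'
          (fun x hx => hmq x (List.mem_of_mem_erase hx))
          hperm' hpw' hFb
      rw [hEF] at hb2 hp2 heq2
      refine ⟨F2, sp2, hb2, hp2, hw2, ?_⟩
      rw [heq2]
      have hlast : ((j :: c2 :: ct2).getLast (by simp)) = ((c2 :: ct2).getLast (by simp)) :=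
        List.getLast_cons _
      rw [hlast]
      have htime : t + 1 + ((c2 :: ct2).length : Int) = t + ((j :: c2 :: ct2).length : Int) := by
        push_cast [List.length_cons]
        ring
      rw [htime]

-- processing the priority group that contains job m
lemma pvGroupHit (m q : Int) :
    ∀ (c : List (Int × Int)) (R : List (Int × Int)) (ptr : Int) (sp : List Int) (t : Int) (fuel : Nat),
    pvAsc R → (∀ x ∈ R, x.2 ≤ q) →
    (pvRot R ptr).filter (fun x => decide (x.2 = q)) = c →
    m ∈ c.map (·.1) →
    sp.Perm (R.map (·.2)) → sp.Pairwise (fun a b => b ≤ a) →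
    R.length * R.length + 1 ≤ fuel →
    pvLoopA fuel ((pvRot R ptr).map (pvQ m)) sp t =
      t + (((PySem.List.index? (c.map (·.1)) m).getD 0 : Nat) : Int) + 1 := by
  intro c
  induction c with
  | nil => intro R ptr sp t fuel _ _ _ hm; simp at hm
  | cons j ctail ih =>
    intro R ptr sp t fuel hR hle hc hm hperm hpw hfuel
    obtain ⟨F, hFb, heq, hjR, hjq, hc', hperm', hpw'⟩ :=
      pvStep m q ptr t R j ctail sp fuel hR hle hc hperm hpw hfuel
    rw [heq]
    by_cases hjm : j.1 = m
    · rw [if_pos hjm]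
      have : PySem.List.index? ((j :: ctail).map (·.1)) m = some 0 := by
        rw [List.map_cons, hjm]
        exact PySem.List.index?_cons_self ..
      rw [this]
      simp
    · rw [if_neg hjm]
      have hm' : m ∈ ctail.map (·.1) := by
        rcases List.mem_map.mp hm with ⟨y, hy, hy1⟩
        rcases List.mem_cons.mp hy with rfl | hy
        · exact absurd hy1 hjm
        · exact List.mem_map.mpr ⟨y, hy, hy1⟩
      rw [ih (R.erase j) (j.1 + 1) sp.tail (t + 1) F
            (hR.sublist List.erase_sublist)
            (fun x hx => hle x (List.mem_of_mem_erase hx))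
            hc' hm' hperm' hpw' hFb]
      obtain ⟨r, hr⟩ := Option.isSome_iff_exists.mp ((PySem.List.index?_isSome_iff _ _).mpr hm')
      have hidx : PySem.List.index? ((j :: ctail).map (·.1)) m =
          Option.map (fun x => x + 1) (PySem.List.index? (ctail.map (·.1)) m) := by
        rw [List.map_cons]
        exact PySem.List.index?_cons_of_ne _ hjm
      rw [hidx, hr]
      simp only [Option.map_some, Option.getD_some]
      push_cast
      ring

-- bisect_left on an ascending list cuts it into the part below and the part at-or-above
lemma pvBisect (g : List Int) (ptr : Int) (hg : g.Pairwise (· < ·)) :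
    g.take (PySem.List.bisectLeft g ptr) = g.filter (fun x => decide (x < ptr)) ∧
    g.drop (PySem.List.bisectLeft g ptr) = g.filter (fun x => decide (ptr ≤ x)) := by
  obtain ⟨hk, hlt, hge⟩ := PySem.List.bisectLeft_spec g ptr (hg.imp le_of_lt)
  set k := PySem.List.bisectLeft g ptr with hkdef
  have h1 : ∀ x ∈ g.take k, x < ptr := by
    intro x hx
    obtain ⟨i, hi, rfl⟩ := List.mem_iff_getElem.mp hx
    have hik : i < k := by simp at hi; omega
    have hil : i < g.length := lt_of_lt_of_le hik hk
    rw [List.getElem_take]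
    exact hlt i hil hik
  have h2 : ∀ x ∈ g.drop k, ptr ≤ x := by
    intro x hx
    obtain ⟨i, hi, rfl⟩ := List.mem_iff_getElem.mp hx
    rw [List.getElem_drop]
    exact hge (k + i) (by simp at hi; omega) (Nat.le_add_right _ _)
  have hsplit := List.take_append_drop k g
  constructor
  · conv_rhs => rw [← hsplit]
    rw [List.filter_append]
    rw [List.filter_eq_self.mpr (fun x hx => by simpa using h1 x hx),
        List.filter_eq_nil_iff.mpr (fun x hx => by simp; exact h2 x hx),
        List.append_nil]
  · conv_rhs => rw [← hsplit]
    rw [List.filter_append]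
    rw [List.filter_eq_nil_iff.mpr (fun x hx => by simp; exact h1 x hx),
        List.filter_eq_self.mpr (fun x hx => by simpa using h2 x hx),
        List.nil_append]

-- a filter on priorities passes through the rotation (which filters on indices)
lemma pvFilterRot (R : List (Int × Int)) (ptr : Int) (p : Int × Int → Bool) :
    (pvRot R ptr).filter p = pvRot (R.filter p) ptr := by
  unfold pvRot
  simp only [List.filter_append, List.filter_filter]
  congr 1 <;> (apply List.filter_congr; intro x _; rw [Bool.and_comm])

lemma pvTakeLast (g : List Int) (k : Nat) (h0 : 0 < k) (hk : k ≤ g.length) :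
    (g.take k).getLast? = g[k-1]? := by
  rw [List.getLast?_eq_getElem?, List.length_take, List.getElem?_take]
  rw [if_pos (by omega)]
  congr 1; omega

lemma pvLastCyc (g : List Int) (ptr : Int) (hne : g ≠ []) (hasc : g.Pairwise (· < ·)) :
    (g.drop (PySem.List.bisectLeft g ptr) ++ g.take (PySem.List.bisectLeft g ptr)).getLast? =
      some (if 0 < PySem.List.bisectLeft g ptr
            then PySem.List.pyGetD g ((PySem.List.bisectLeft g ptr : Int) - 1) 0
            else PySem.List.pyGetD g (-1) 0) := by
  obtain ⟨hk, -, -⟩ := PySem.List.bisectLeft_spec g ptr (hasc.imp le_of_lt)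
  set k := PySem.List.bisectLeft g ptr with hkdef
  by_cases h0 : 0 < k
  · rw [if_pos h0, List.getLast?_append]
    have htake : (g.take k).getLast? = g[k-1]? := pvTakeLast g k h0 hk
    have hgd : PySem.List.pyGetD g ((k : Int) - 1) 0 = g.getD (k-1) 0 := by
      have : ((k : Int) - 1) = ((k - 1 : Nat) : Int) := by omega
      rw [this, PySem.List.pyGetD_natCast]
    rw [htake, hgd, List.getD_eq_getElem?_getD]
    have : g[k-1]?.isSome := by
      have hlt : k - 1 < g.length := by omega
      exact (List.getElem?_eq_getElem hlt) ▸ rfl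
    obtain ⟨w, hw⟩ := Option.isSome_iff_exists.mp this
    rw [hw]
    simp
  · have hk0 : k = 0 := by omega
    rw [if_neg h0, hk0, List.drop_zero, List.take_zero, List.append_nil,
      PySem.List.pyGetD_neg_one g 0 hne, List.getLast?_eq_some_getLast hne]

lemma pvMapFst (G : List (Int × Int)) (p : Int → Bool) :
    (G.filter (fun x => p x.1)).map (·.1) = (G.map (·.1)).filter p := by
  rw [List.filter_map]
  rfl

-- the main loop correspondence: A's remaining simulation = B's remaining group walk
lemma pvOuter (m target : Int) (d : PySem.Dict Int (List Int)) :
    ∀ (qs : List Int) (R : List (Int × Int)) (ptr : Int) (sp : List Int) (t : Int) (fuel : Nat),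
    qs.Pairwise (fun a b => b < a) →
    (∀ x ∈ R, x.2 ∈ qs) →
    (∀ q ∈ qs, d.getD q [] = (R.filter (fun x => decide (x.2 = q))).map (·.1)) →
    (∀ q ∈ qs, R.filter (fun x => decide (x.2 = q)) ≠ []) →
    pvAsc R →
    (∃ x ∈ R, x.1 = m ∧ x.2 = target) →
    sp.Perm (R.map (·.2)) → sp.Pairwise (fun a b => b ≤ a) →
    R.length * R.length + 1 ≤ fuel →
    pvLoopA fuel ((pvRot R ptr).map (pvQ m)) sp t = pvLoopB d target m qs t ptr := by
  intro qs
  induction qs with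
  | nil =>
    intro R ptr sp t fuel _ hmem _ _ _ hm _ _ _
    obtain ⟨x, hx, -, -⟩ := hm
    exact absurd (hmem x hx) (List.not_mem_nil)
  | cons q0 qs' ih =>
    intro R ptr sp t fuel hqs hmem hg hne hR hm hperm hpw hfuel
    obtain ⟨hq0gt, hqs'⟩ := List.pairwise_cons.mp hqs
    have hle : ∀ x ∈ R, x.2 ≤ q0 := by
      intro x hx
      rcases List.mem_cons.mp (hmem x hx) with h | h
      · omega
      · have := hq0gt _ h; omega
    have hgq0 := hg q0 (List.mem_cons_self ..)
    have hGasc : pvAsc (R.filter (fun x => decide (x.2 = q0))) :=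
      hR.sublist List.filter_sublist
    have hGne := hne q0 (List.mem_cons_self ..)
    set G := R.filter (fun x => decide (x.2 = q0)) with hGdef
    have gasc : (G.map (·.1)).Pairwise (· < ·) := List.pairwise_map.mpr hGasc
    have hgne : G.map (·.1) ≠ [] := by simpa using hGne
    have hcrot : (pvRot R ptr).filter (fun x => decide (x.2 = q0)) = pvRot G ptr :=
      pvFilterRot R ptr _
    have hclen : (pvRot G ptr).length = G.length := pvRot_length G ptr
    -- B's cyclic view of the group is A's rotation of the group
    obtain ⟨htake, hdrop⟩ := pvBisect (G.map (·.1)) ptr gasc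
    have hcyc : (G.map (·.1)).drop (PySem.List.bisectLeft (G.map (·.1)) ptr) ++
        (G.map (·.1)).take (PySem.List.bisectLeft (G.map (·.1)) ptr) =
        (pvRot G ptr).map (·.1) := by
      rw [htake, hdrop]
      unfold pvRot
      rw [List.map_append]
      exact congrArg₂ (· ++ ·) (pvMapFst G (fun y => decide (ptr ≤ y))).symm
        (pvMapFst G (fun y => decide (y < ptr))).symm
    rw [pvLoopB.eq_def]
    simp only [hgq0]
    by_cases htgt : q0 = target
    · rw [if_pos htgt]
      obtain ⟨w, hw, hw1, hw2⟩ := hm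
      have hwG : w ∈ G := List.mem_filter.mpr ⟨hw, by simp [hw2, htgt]⟩
      have hmmem : m ∈ (pvRot G ptr).map (·.1) :=
        List.mem_map.mpr ⟨w, (pvRot_perm G ptr).mem_iff.mpr hwG, hw1⟩
      rw [pvGroupHit m q0 (pvRot G ptr) R ptr sp t fuel hR hle hcrot hmmem hperm hpw hfuel]
      rw [PySem.List.slice_from_natCast, PySem.List.slice_to_natCast, hcyc]
    · rw [if_neg htgt]
      have hmq : ∀ x ∈ R, x.1 = m → x.2 ≠ q0 := by
        intro x hx hxm
        obtain ⟨w, hw, hw1, hw2⟩ := hm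
        have : x = w := pvFstInj R hR x hx w hw (by rw [hxm, hw1])
        rw [this, hw2]
        exact fun h => htgt h.symm
      have hcne : pvRot G ptr ≠ [] := by
        intro h0
        have : G.length = 0 := by rw [← hclen, h0]; rfl
        exact hGne (List.length_eq_zero_iff.mp this)
      obtain ⟨F2, sp2, hb2, hp2, hw2, heq2⟩ :=
        pvGroupMiss m q0 (pvRot G ptr) R ptr sp t fuel hcne hR hle hcrot hmq hperm hpw hfuel
      rw [heq2]
      -- B's pointer update is the index after the group's last printed job
      have hlast : (if 0 < PySem.List.bisectLeft (G.map (·.1)) ptr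
            then PySem.List.pyGetD (G.map (·.1)) ((PySem.List.bisectLeft (G.map (·.1)) ptr : Int) - 1) 0
            else PySem.List.pyGetD (G.map (·.1)) (-1) 0) = ((pvRot G ptr).getLast hcne).1 := by
        have h1 := pvLastCyc (G.map (·.1)) ptr hgne gasc
        rw [hcyc, List.getLast?_map, List.getLast?_eq_some_getLast hcne] at h1
        simp only [Option.map_some, Option.some_inj] at h1
        exact h1.symm
      have hlen2 : ((G.map (·.1)).length : Int) = ((pvRot G ptr).length : Int) := by
        rw [List.length_map, hclen]
      rw [hlast, hlen2]
      -- recurse over the remaining (strictly smaller) priorities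
      apply ih
      · exact hqs'
      · intro x hx
        have hxR : x ∈ R := List.mem_of_mem_filter hx
        have hxne : x.2 ≠ q0 := by
          have := (List.mem_filter.mp hx).2; simpa using this
        rcases List.mem_cons.mp (hmem x hxR) with h | h
        · exact absurd h hxne
        · exact h
      · intro q' hq'
        have hlt := hq0gt q' hq'
        rw [hg q' (List.mem_cons_of_mem _ hq')]
        congr 1
        rw [List.filter_filter]
        exact (pvFilterCongrR R
          (fun x => decide (x.2 = q') && decide (x.2 ≠ q0))
          (fun x => decide (x.2 = q'))
          (fun x => pvDecAnd (by omega))).symm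
      · intro q' hq'
        have hlt := hq0gt q' hq'
        have := hne q' (List.mem_cons_of_mem _ hq')
        rw [List.filter_filter]
        rw [pvFilterCongrR R
          (fun x => decide (x.2 = q') && decide (x.2 ≠ q0))
          (fun x => decide (x.2 = q'))
          (fun x => pvDecAnd (by omega))]
        exact this
      · exact hR.sublist List.filter_sublist
      · obtain ⟨w, hw, hw1, hw2⟩ := hm
        exact ⟨w, List.mem_filter.mpr ⟨hw, by simp [hw2]; exact fun h => htgt h.symm⟩, hw1, hw2⟩
      · exact hp2
      · exact hw2
      · exact hb2

-- ===== VERDICT (by name: the statement is the Claim_ definition above) =====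
lemma pvGroupsGetD : ∀ (l : List (Int × Int)) (d : PySem.Dict Int (List Int)) (q : Int),
    (l.foldl (fun d x => d.modify x.2 [] (fun v => v ++ [x.1])) d).getD q [] =
      d.getD q [] ++ (l.filter (fun x => decide (x.2 = q))).map (·.1) := by
  intro l
  induction l with
  | nil => simp
  | cons a l ih =>
    intro d q
    rw [List.foldl_cons, ih, PySem.Dict.getD_modify]
    by_cases h : q = a.2
    · rw [if_pos h, List.filter_cons, if_pos (by simp [h])]
      simp [h, List.append_assoc]
    · rw [if_neg h, List.filter_cons, if_neg (by simp; exact fun hh => h hh.symm)]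

theorem calculate_print_time_spec : Claim_equal_calculate_print_time := by
  intro n m priorities _ hpre
  obtain ⟨hm0, hmlen⟩ := hpre
  unfold Spec_calculate_print_time calculate_print_time calculate_print_time_alt
  simp only []
  set R0 := PySem.List.enumerate priorities 0 with hR0
  set dd := pvBuildGroups R0 with hdd
  set target := PySem.List.pyGetD priorities m 0 with htarget
  set qs0 := PySem.List.sorted dd.keys (fun x => x) true with hqs0def
  set sp0 := PySem.List.sorted priorities (fun x => x) true with hsp0def
  have hR0asc : pvAsc R0 := PySem.List.pairwise_lt_enumerate ..
  have hlen : R0.length = priorities.length := PySem.List.length_enumerate ..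
  have hmap2 : R0.map (·.2) = priorities := PySem.List.map_snd_enumerate ..
  have hmlt : m.toNat < priorities.length := by omega
  have htid : target = priorities[m.toNat] := by
    rw [htarget, PySem.List.pyGetD_eq_getElem priorities 0 hm0 (by exact_mod_cast hmlen)]
  -- the initial queue is the unrotated job list
  have hrot0 : pvRot R0 0 = R0 := by
    unfold pvRot
    rw [List.filter_eq_self.mpr (fun x hx => by
          obtain ⟨k, hk, rfl⟩ := (PySem.List.mem_enumerate_iff ..).mp hx
          simp),
        List.filter_eq_nil_iff.mpr (fun x hx => by
          obtain ⟨k, hk, rfl⟩ := (PySem.List.mem_enumerate_iff ..).mp hx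
          simp),
        List.append_nil]
  have hkeys : dd.keys = PySem.Set.ofList priorities := by
    rw [hdd]
    unfold pvBuildGroups
    rw [PySem.Dict.keys_foldl_modify_key R0 (fun x => x.2) [] (fun d x => (fun v => v ++ [x.1]))
        PySem.Dict.empty]
    rw [PySem.Dict.keys_empty, PySem.Set.update_nil_left, hmap2]
  have hperm0 : sp0.Perm (R0.map (·.2)) := by
    rw [hmap2]; exact PySem.List.sorted_perm ..
  have hpw0 : sp0.Pairwise (fun a b => b ≤ a) := PySem.List.sorted_pairwise_rev ..
  have hndkeys : dd.keys.Nodup := by rw [hkeys]; exact PySem.Set.nodup_ofList _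
  have hqsnd : qs0.Nodup := ((PySem.List.sorted_perm ..).nodup_iff).mpr hndkeys
  have hqspw : qs0.Pairwise (fun a b => b ≤ a) := PySem.List.sorted_pairwise_rev ..
  have hqs : qs0.Pairwise (fun a b => b < a) :=
    (hqspw.and hqsnd).imp (fun h => by omega)
  have hmem0 : ∀ x ∈ R0, x.2 ∈ qs0 := by
    intro x hx
    rw [hqs0def, PySem.List.mem_sorted, hkeys, PySem.Set.mem_ofList]
    obtain ⟨k, hk, rfl⟩ := (PySem.List.mem_enumerate_iff ..).mp hx
    exact List.getElem_mem hk
  have hg0 : ∀ q ∈ qs0, dd.getD q [] = (R0.filter (fun x => decide (x.2 = q))).map (·.1) := by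
    intro q _
    rw [hdd]
    unfold pvBuildGroups
    rw [pvGroupsGetD R0 PySem.Dict.empty q, PySem.Dict.getD_empty, List.nil_append]
  have hne0 : ∀ q ∈ qs0, R0.filter (fun x => decide (x.2 = q)) ≠ [] := by
    intro q hq
    rw [hqs0def, PySem.List.mem_sorted, hkeys, PySem.Set.mem_ofList] at hq
    obtain ⟨k, hk, hkq⟩ := List.mem_iff_getElem.mp hq
    have hxmem : ((k : Int), priorities[k]) ∈ R0 :=
      (PySem.List.mem_enumerate_iff ..).mpr ⟨k, hk, by simp⟩
    exact List.ne_nil_of_mem (List.mem_filter.mpr ⟨hxmem, by simp [hkq]⟩)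
  have hmw : ∃ x ∈ R0, x.1 = m ∧ x.2 = target := by
    refine ⟨(m, target), ?_, rfl, rfl⟩
    exact (PySem.List.mem_enumerate_iff ..).mpr ⟨m.toNat, hmlt, by rw [htid]; simp; omega⟩
  have hfuel : R0.length * R0.length + 1 ≤ priorities.length * priorities.length + 1 := by
    rw [hlen]
  have hmain := pvOuter m target dd qs0 R0 0 sp0 0
    (priorities.length * priorities.length + 1)
    hqs hmem0 hg0 hne0 hR0asc hmw hperm0 hpw0 hfuel
  rw [hrot0] at hmain
  exact hmain
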